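-- pv_equiv track=rewrite | github.com/weichslgartner/AdventOfCode2022 | Python/day_06.py | solve
-- ===== SOURCE A (Python) =====
-- from collections import defaultdict
--
-- def solve(line, window_size=4):
--     deque = []
--     char_cnt = defaultdict(int)
--     for idx, c in enumerate(line):
--         char_cnt[c] += 1
--         deque.append(c)
--         if len(deque) > window_size:
--             to_remove = deque.pop(0)
--             char_cnt[to_remove] -= 1
--             if char_cnt[to_remove] == 0:
--                 del char_cnt[to_remove]
--         if len(char_cnt) == window_size:
--             return idx + 1
--     # no solution found
--     return 0
-- ===== SOURCE B (Python) =====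
-- def solve(line, window_size=4):
--     # Re-scan each fixed-size window instead of maintaining an incremental
--     # count dict: the first window of window_size distinct chars decides.
--     # (A negative window size is clamped to 0; no window ever matches it.)
--     for i in range(max(window_size, 0), len(line) + 1):
--         if len(set(line[i - window_size:i])) == window_size:
--             return i
--     return 0
-- ===== Notes on version B (the rewrite author's own statement) =====
-- stated objective: simpler
-- what changed: B replaces A's single-pass incremental deque+count-dict eviction with a direct re-scan: for each end position i it rebuilds set(line[i-window_size:i]) and returns the first i whose window has window_size distinct characters.
-- intended difference: On window_size = 0 with a non-empty line A returns 1 (its count dict only becomes empty after the first character is evicted) while B returns 0, the intended first position at which an empty window trivially has 0 distinct characters. — e.g. on solve("a", 0): A returns 1, B returns 0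
import Mathlib
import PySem

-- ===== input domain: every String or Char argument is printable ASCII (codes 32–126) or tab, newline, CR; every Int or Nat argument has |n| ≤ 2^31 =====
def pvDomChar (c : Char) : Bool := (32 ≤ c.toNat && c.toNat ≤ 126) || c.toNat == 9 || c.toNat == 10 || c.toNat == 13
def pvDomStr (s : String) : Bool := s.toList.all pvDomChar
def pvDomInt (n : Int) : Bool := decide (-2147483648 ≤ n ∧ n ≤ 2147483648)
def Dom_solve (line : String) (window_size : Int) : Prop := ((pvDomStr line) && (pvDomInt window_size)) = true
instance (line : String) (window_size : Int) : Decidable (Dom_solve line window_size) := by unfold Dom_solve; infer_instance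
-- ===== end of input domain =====

-- B re-scans each fixed-size window (`len(set(line[i-ws:i])) == ws`) instead of A's
-- incremental deque + count-dict eviction: simpler, same O(n·ws) cost.

-- ===== PORT A =====
-- the for-loop over `line` with early return; state = (deque, char_cnt)
def solveLoopA (window_size : Int) : List Char → Int → List Char × PySem.Dict Char Int → Int
  | [], _, _ => 0
  | c :: rest, idx, (dq, cnt) =>
      let cnt1 := cnt.modify c 0 (· + 1)          -- char_cnt[c] += 1  (defaultdict)
      let dq1 := dq ++ [c]                        -- deque.append(c)
      let st :=
        if (dq1.length : Int) > window_size then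
          let r := dq1.headD c                    -- to_remove = deque.pop(0)  (dq1 ≠ [])
          let cnt2 := cnt1.modify r 0 (· - 1)     -- char_cnt[to_remove] -= 1
          (dq1.tail, if cnt2.getD r 0 == 0 then cnt2.erase r else cnt2)
        else (dq1, cnt1)
      if (st.2.size : Int) == window_size then idx + 1
      else solveLoopA window_size rest (idx + 1) st

def solve (line : String) (window_size : Int) : Int :=
  solveLoopA window_size line.toList 0 ([], PySem.Dict.empty)

-- ===== PORT B =====
-- the for-loop over range(window_size, len(line)+1) with early return
def solveLoopB (cs : List Char) (window_size : Int) : List Int → Int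
  | [] => 0
  | i :: rest =>
      if PySem.Set.len (PySem.Set.ofList (PySem.List.slice cs (some (i - window_size)) (some i))) == window_size
      then i else solveLoopB cs window_size rest

def solve_alt (line : String) (window_size : Int) : Int :=
  solveLoopB line.toList window_size (PySem.List.pyRange (max window_size 0) (PySem.Str.len line + 1))

-- ===== PRECONDITION & SPEC =====
-- A window of size 0 occurs before any character is read: on window_size = 0 with a
-- non-empty line A returns 1 (its count dict only becomes empty after the first eviction),
-- B returns 0 (the empty window at position 0 already has 0 distinct characters) — the
-- intended first position for a zero-size window.
def D_solve (line : String) (window_size : Int) : Prop := window_size = 0 ∧ line ≠ ""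
instance (line : String) (window_size : Int) : Decidable (D_solve line window_size) := by
  unfold D_solve; infer_instance

def Spec_solve (line : String) (window_size : Int) (out : Int) : Prop :=
  ¬ D_solve line window_size → out = solve_alt line window_size
instance (line : String) (window_size : Int) (out : Int) : Decidable (Spec_solve line window_size out) := by
  unfold Spec_solve; infer_instance

def pvDiffWitness_solve : String × Int := ("a", 0)
def pvDiffWitnessOut_solve : Int × Int := (1, 0)

-- ===== CLAIM (what is proved, stated in full; the proofs are below) =====
def Claim_unchanged_solve : Prop := ∀ (line : String) (window_size : Int), Dom_solve line window_size → Spec_solve line window_size (solve line window_size)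
def Claim_changed_solve : Prop := Dom_solve (pvDiffWitness_solve.1) (pvDiffWitness_solve.2) ∧ D_solve (pvDiffWitness_solve.1) (pvDiffWitness_solve.2) ∧ solve (pvDiffWitness_solve.1) (pvDiffWitness_solve.2) = pvDiffWitnessOut_solve.1 ∧ solve_alt (pvDiffWitness_solve.1) (pvDiffWitness_solve.2) = pvDiffWitnessOut_solve.2 ∧ pvDiffWitnessOut_solve.1 ≠ pvDiffWitnessOut_solve.2
def Claim_exact_solve : Prop := ∀ (line : String) (window_size : Int), Dom_solve line window_size → D_solve line window_size → solve line window_size ≠ solve_alt line window_size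

-- ===== LEMMAS AND PROOFS =====

-- the common characterisation: position k (1-based) is "good" iff the window of the
-- last `w` characters of the k-prefix has exactly w distinct characters
def winOf (cs : List Char) (w k : Nat) : List Char := (cs.take k).drop (k - w)

def goodAt (cs : List Char) (w : Nat) (k : Nat) : Bool :=
  decide ((PySem.Set.ofList (winOf cs w k)).length = w)

def intOfFind : Option Nat → Int
  | some k => (k : Int)
  | none => 0

-- two Nodup lists with the same members have the same length
theorem nodup_len_eq {α : Type} {l₁ l₂ : List α} (h₁ : l₁.Nodup) (h₂ : l₂.Nodup)
    (h : ∀ a, a ∈ l₁ ↔ a ∈ l₂) : l₁.length = l₂.length :=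
  ((List.perm_ext_iff_of_nodup h₁ h₂).2 h).length_eq

-- facts about Dict.erase (no lemmas for erase are in the prelude)
theorem keys_erase_sublist {κ ν : Type} [BEq κ] (d : PySem.Dict κ ν) (k : κ) :
    (d.erase k).keys.Sublist d.keys := by
  simp only [PySem.Dict.keys, PySem.Dict.erase]
  exact List.filter_sublist.map _

theorem nodup_keys_erase {κ ν : Type} [BEq κ] (d : PySem.Dict κ ν) (k : κ)
    (h : d.keys.Nodup) : (d.erase k).keys.Nodup := (keys_erase_sublist d k).nodup h

theorem mem_keys_erase {κ ν : Type} [BEq κ] [LawfulBEq κ] (d : PySem.Dict κ ν) (k k' : κ) :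
    k' ∈ (d.erase k).keys ↔ k' ∈ d.keys ∧ k' ≠ k := by
  simp only [PySem.Dict.keys, PySem.Dict.erase, List.mem_map, List.mem_filter]
  constructor
  · rintro ⟨p, ⟨hp, hne⟩, rfl⟩
    exact ⟨⟨p, hp, rfl⟩, by simpa using hne⟩
  · rintro ⟨⟨p, hp, rfl⟩, hne⟩
    exact ⟨p, ⟨hp, by simpa using hne⟩, rfl⟩

theorem getD_erase_of_ne {κ ν : Type} [BEq κ] [LawfulBEq κ] (d : PySem.Dict κ ν)
    (k k' : κ) (d0 : ν) (h : k' ≠ k) : (d.erase k).getD k' d0 = d.getD k' d0 := by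
  simp only [PySem.Dict.getD, PySem.Dict.get?, PySem.Dict.erase]
  congr 1
  induction d.items with
  | nil => rfl
  | cons p rest ih =>
      rw [List.filter_cons]
      by_cases hpk : p.1 = k
      · have hpk' : (p.1 == k') = false := by
          simpa [hpk] using fun e => h e.symm
        have hkk' : (k == k') = false := by simpa using fun e => h e.symm
        simp only [hpk, beq_self_eq_true, Bool.not_true, Bool.false_eq_true, if_false,
          List.find?_cons, hkk', ih]
      · have hpk2 : (!p.1 == k) = true := by simpa using hpk
        rw [hpk2, if_pos rfl, List.find?_cons, List.find?_cons]
        cases hf : (p.1 == k') with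
        | true => rfl
        | false => exact ih

theorem getD_erase_self {κ ν : Type} [BEq κ] [LawfulBEq κ] (d : PySem.Dict κ ν) (k : κ) (d0 : ν) :
    (d.erase k).getD k d0 = d0 := by
  simp only [PySem.Dict.getD, PySem.Dict.get?, PySem.Dict.erase]
  have hnone : List.find? (fun p => p.1 == k) (d.items.filter (fun p => !p.1 == k)) = none := by
    rw [List.find?_eq_none]
    intro a ha
    simpa using (List.mem_filter.mp ha).2
  rw [hnone]
  rfl

-- A's membership test `len(char_cnt) == window_size` counts the distinct window characters
theorem cond_eq (cnt : PySem.Dict Char Int) (xs : List Char) (w : Nat)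
    (hnd : cnt.keys.Nodup) (hmem : ∀ c, c ∈ cnt.keys ↔ c ∈ xs) :
    ((cnt.size : Int) == (w : Int)) = decide ((PySem.Set.ofList xs).length = w) := by
  have hsz : cnt.size = (PySem.Set.ofList xs).length := by
    have hkl : cnt.keys.length = (PySem.Set.ofList xs).length :=
      nodup_len_eq hnd (PySem.Set.nodup_ofList xs)
        (fun a => (hmem a).trans (PySem.Set.mem_ofList xs a).symm)
    simpa [PySem.Dict.keys, PySem.Dict.size] using hkl
  rw [hsz]
  cases h : decide ((PySem.Set.ofList xs).length = w) with
  | true =>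
      simp only [decide_eq_true_eq] at h
      simp [h]
  | false =>
      simp only [decide_eq_false_iff_not] at h
      simp only [beq_eq_false_iff_ne, ne_eq]
      intro heq
      exact h (by exact_mod_cast heq)

-- A's loop invariant and characterisation
theorem solveLoopA_eq (ws : Int) (hws : 0 < ws) (cs : List Char) :
    ∀ (suf pre dq : List Char) (cnt : PySem.Dict Char Int),
    cs = pre ++ suf →
    dq = pre.drop (pre.length - ws.toNat) →
    cnt.keys.Nodup →
    (∀ c, cnt.getD c 0 = (dq.count c : Int)) →
    (∀ c, c ∈ cnt.keys ↔ c ∈ dq) →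
    solveLoopA ws suf (pre.length : Int) (dq, cnt) =
      intOfFind ((List.range' (pre.length + 1) suf.length).find? (goodAt cs ws.toNat)) := by
  intro suf
  induction suf with
  | nil => intro pre dq cnt _ _ _ _ _; rfl
  | cons c rest ih =>
      intro pre dq cnt hcs hdq hnd hcount hmem
      have hw1 : 1 ≤ ws.toNat := by omega
      have hjlen : pre.length + 1 ≤ cs.length := by
        rw [hcs]; simp
      have hdql : dq.length = pre.length - (pre.length - ws.toNat) := by
        rw [hdq, List.length_drop]
      have htake : cs.take (pre.length + 1) = pre ++ [c] := by
        rw [hcs]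
        have := List.take_length_add_append (l₁ := pre) (l₂ := c :: rest) 1
        simpa using this
      have hwin : winOf cs ws.toNat (pre.length + 1) =
          pre.drop (pre.length + 1 - ws.toNat) ++ [c] := by
        unfold winOf
        rw [htake, List.drop_append_of_le_length (by omega)]
      simp only [solveLoopA, List.length_cons]
      rw [List.range'_succ, List.find?_cons]
      by_cases hjw : pre.length < ws.toNat
      · -- no eviction yet: the deque is the whole prefix
        have hpre : dq = pre := by
          rw [hdq, Nat.sub_eq_zero_of_le (by omega), List.drop_zero]
        have hiff : ¬ ((dq ++ [c]).length : Int) > ws := by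
          rw [List.length_append, hdql]
          simp only [List.length_cons, List.length_nil]
          omega
        rw [if_neg hiff]
        have hwin' : winOf cs ws.toNat (pre.length + 1) = dq ++ [c] := by
          rw [hwin, Nat.sub_eq_zero_of_le (by omega), List.drop_zero, hpre]
        have hcond : (((cnt.modify c 0 (· + 1)).size : Int) == ws) =
            goodAt cs ws.toNat (pre.length + 1) := by
          unfold goodAt
          rw [hwin', ← Int.toNat_of_nonneg hws.le]
          apply cond_eq
          · rw [PySem.Dict.keys_modify]
            exact PySem.Dict.nodup_keys_insert _ _ _ hnd
          · intro a
            rw [PySem.Dict.keys_modify, PySem.Dict.mem_keys_insert]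
            simp [hmem a]
            tauto
        rw [hcond]
        cases hg : goodAt cs ws.toNat (pre.length + 1) with
        | true =>
            rw [if_pos rfl]
            rfl
        | false =>
            rw [if_neg (by simp)]
            have hrw : ((pre.length : Int) + 1) = (((pre ++ [c]).length : Nat) : Int) := by
              simp
            rw [hrw]
            have := ih (pre ++ [c]) (dq ++ [c]) (cnt.modify c 0 (· + 1))
              (by rw [hcs]; simp)
              (by rw [List.length_append, hpre]
                  simp only [List.length_cons, List.length_nil]
                  rw [Nat.sub_eq_zero_of_le (by omega), List.drop_zero])
              (by rw [PySem.Dict.keys_modify]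
                  exact PySem.Dict.nodup_keys_insert _ _ _ hnd)
              (by intro a
                  rw [PySem.Dict.getD_modify]
                  by_cases hac : a = c
                  · rw [if_pos hac, hcount c, hac]
                    simp [List.count_append]
                  · rw [if_neg hac, hcount a]
                    simp only [List.count_append, List.count_singleton, beq_iff_eq,
                      Nat.cast_add, Nat.cast_ite, Nat.cast_one, Nat.cast_zero]
                    rw [if_neg (fun h => hac h.symm)]
                    omega)
              (by intro a
                  rw [PySem.Dict.keys_modify, PySem.Dict.mem_keys_insert]
                  simp [hmem a]
                  tauto)
            simpa using this
      · -- eviction: the deque has exactly window_size characters before the append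
        have hdqlen : dq.length = ws.toNat := by omega
        have hdqne : dq ≠ [] := by
          intro hnil; rw [hnil] at hdqlen; simp at hdqlen; omega
        obtain ⟨d0, dtl, hdq0⟩ := List.exists_cons_of_ne_nil hdqne
        have hgt : ((dq ++ [c]).length : Int) > ws := by
          rw [List.length_append, hdqlen]
          simp only [List.length_cons, List.length_nil]
          omega
        rw [if_pos hgt]
        have hhead : (dq ++ [c]).headD c = d0 := by rw [hdq0]; rfl
        have htail : (dq ++ [c]).tail = dtl ++ [c] := by rw [hdq0]; rfl
        have hdtl : dtl = pre.drop (pre.length + 1 - ws.toNat) := by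
          have h1 : dtl = dq.tail := by rw [hdq0, List.tail_cons]
          rw [h1, hdq, List.tail_drop]
          congr 1
          omega
        rw [hhead, htail]
        -- counts after the two modifies
        have hcount1 : ∀ a, (cnt.modify c 0 (· + 1)).getD a 0 = (((dq ++ [c]).count a : Nat) : Int) := by
          intro a
          rw [PySem.Dict.getD_modify]
          by_cases hac : a = c
          · rw [if_pos hac, hcount c, hac]
            simp [List.count_append]
          · rw [if_neg hac, hcount a]
            simp only [List.count_append, List.count_singleton, beq_iff_eq,
              Nat.cast_add, Nat.cast_ite, Nat.cast_one, Nat.cast_zero]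
            rw [if_neg (fun h => hac h.symm)]
            omega
        have hmem1 : ∀ a, a ∈ (cnt.modify c 0 (· + 1)).keys ↔ a ∈ dq ++ [c] := by
          intro a
          rw [PySem.Dict.keys_modify, PySem.Dict.mem_keys_insert]
          simp [hmem a]
          tauto
        have hnd1 : (cnt.modify c 0 (· + 1)).keys.Nodup := by
          rw [PySem.Dict.keys_modify]
          exact PySem.Dict.nodup_keys_insert _ _ _ hnd
        have hsplit : dq ++ [c] = d0 :: (dtl ++ [c]) := by rw [hdq0]; rfl
        have hcount2 : ∀ a, ((cnt.modify c 0 (· + 1)).modify d0 0 (· - 1)).getD a 0 =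
            (((dtl ++ [c]).count a : Nat) : Int) := by
          intro a
          rw [PySem.Dict.getD_modify]
          by_cases had : a = d0
          · rw [if_pos had, hcount1 d0, had, hsplit]
            simp [List.count_cons]
          · rw [if_neg had, hcount1 a, hsplit]
            simp only [List.count_cons, beq_iff_eq]
            rw [if_neg (fun h => had h.symm)]
            simp
        have hmem2 : ∀ a, a ∈ ((cnt.modify c 0 (· + 1)).modify d0 0 (· - 1)).keys ↔
            a ∈ dq ++ [c] := by
          intro a
          rw [PySem.Dict.keys_modify, PySem.Dict.mem_keys_insert]
          rw [hmem1 a]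
          constructor
          · rintro (rfl | h)
            · rw [hsplit]; exact List.mem_cons_self
            · exact h
          · exact Or.inr
        have hnd2 : ((cnt.modify c 0 (· + 1)).modify d0 0 (· - 1)).keys.Nodup := by
          rw [PySem.Dict.keys_modify]
          exact PySem.Dict.nodup_keys_insert _ _ _ hnd1
        by_cases hz : (dtl ++ [c]).count d0 = 0
        · -- the evicted character's count hits 0: it is deleted
          have hzb : (((cnt.modify c 0 (· + 1)).modify d0 0 (· - 1)).getD d0 0 == 0) = true := by
            rw [hcount2 d0, hz]; simp
          rw [if_pos hzb]
          have hd0notin : d0 ∉ dtl ++ [c] := List.count_eq_zero.mp hz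
          have hcount3 : ∀ a, (((cnt.modify c 0 (· + 1)).modify d0 0 (· - 1)).erase d0).getD a 0 =
              (((dtl ++ [c]).count a : Nat) : Int) := by
            intro a
            by_cases had : a = d0
            · rw [had, getD_erase_self, hz]
              rfl
            · rw [getD_erase_of_ne _ _ _ _ had, hcount2 a]
          have hmem3 : ∀ a, a ∈ (((cnt.modify c 0 (· + 1)).modify d0 0 (· - 1)).erase d0).keys ↔
              a ∈ dtl ++ [c] := by
            intro a
            rw [mem_keys_erase, hmem2 a, hsplit]
            constructor
            · rintro ⟨h, hne⟩
              rcases List.mem_cons.mp h with rfl | h2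
              · exact absurd rfl hne
              · exact h2
            · intro h
              exact ⟨List.mem_cons_of_mem _ h, fun he => hd0notin (he ▸ h)⟩
          have hnd3 : (((cnt.modify c 0 (· + 1)).modify d0 0 (· - 1)).erase d0).keys.Nodup :=
            nodup_keys_erase _ _ hnd2
          have hwin2 : winOf cs ws.toNat (pre.length + 1) = dtl ++ [c] := by
            rw [hwin, ← hdtl]
          have hcond : (((((cnt.modify c 0 (· + 1)).modify d0 0 (· - 1)).erase d0).size : Int) == ws) =
              goodAt cs ws.toNat (pre.length + 1) := by
            unfold goodAt
            rw [hwin2, ← Int.toNat_of_nonneg hws.le]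
            exact cond_eq _ _ _ hnd3 hmem3
          rw [hcond]
          cases hg : goodAt cs ws.toNat (pre.length + 1) with
          | true =>
              rw [if_pos rfl]
              rfl
          | false =>
              rw [if_neg (by simp)]
              have hrw : ((pre.length : Int) + 1) = (((pre ++ [c]).length : Nat) : Int) := by
                simp
              rw [hrw]
              have := ih (pre ++ [c]) (dtl ++ [c]) (((cnt.modify c 0 (· + 1)).modify d0 0 (· - 1)).erase d0)
                (by rw [hcs]; simp)
                (by rw [List.length_append]
                    simp only [List.length_cons, List.length_nil]
                    rw [List.drop_append_of_le_length (by omega), ← hdtl])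
                hnd3 hcount3 hmem3
              simpa using this
        · -- the evicted character still occurs in the window
          have hzb : ¬ ((((cnt.modify c 0 (· + 1)).modify d0 0 (· - 1)).getD d0 0 == 0) = true) := by
            rw [hcount2 d0]
            simp only [beq_iff_eq]
            exact fun h => hz (by exact_mod_cast h)
          rw [if_neg hzb]
          have hd0in : d0 ∈ dtl ++ [c] := List.count_pos_iff.mp (Nat.pos_of_ne_zero hz)
          have hcount3 : ∀ a, ((cnt.modify c 0 (· + 1)).modify d0 0 (· - 1)).getD a 0 =
              (((dtl ++ [c]).count a : Nat) : Int) := hcount2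
          have hmem3 : ∀ a, a ∈ ((cnt.modify c 0 (· + 1)).modify d0 0 (· - 1)).keys ↔
              a ∈ dtl ++ [c] := by
            intro a
            rw [hmem2 a, hsplit]
            constructor
            · intro h
              rcases List.mem_cons.mp h with rfl | h2
              · exact hd0in
              · exact h2
            · exact List.mem_cons_of_mem _
          have hnd3 : ((cnt.modify c 0 (· + 1)).modify d0 0 (· - 1)).keys.Nodup := hnd2
          have hwin2 : winOf cs ws.toNat (pre.length + 1) = dtl ++ [c] := by
            rw [hwin, ← hdtl]
          have hcond : ((((cnt.modify c 0 (· + 1)).modify d0 0 (· - 1)).size : Int) == ws) =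
              goodAt cs ws.toNat (pre.length + 1) := by
            unfold goodAt
            rw [hwin2, ← Int.toNat_of_nonneg hws.le]
            exact cond_eq _ _ _ hnd3 hmem3
          rw [hcond]
          cases hg : goodAt cs ws.toNat (pre.length + 1) with
          | true =>
              rw [if_pos rfl]
              rfl
          | false =>
              rw [if_neg (by simp)]
              have hrw : ((pre.length : Int) + 1) = (((pre ++ [c]).length : Nat) : Int) := by
                simp
              rw [hrw]
              have := ih (pre ++ [c]) (dtl ++ [c]) ((cnt.modify c 0 (· + 1)).modify d0 0 (· - 1))
                (by rw [hcs]; simp)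
                (by rw [List.length_append]
                    simp only [List.length_cons, List.length_nil]
                    rw [List.drop_append_of_le_length (by omega), ← hdtl])
                hnd3 hcount3 hmem3
              simpa using this

-- B's loop characterisation
theorem solveLoopB_eq (ws : Int) (hws : 0 < ws) (cs : List Char) :
    ∀ (m k : Nat), ws.toNat ≤ k → m = cs.length + 1 - k →
    solveLoopB cs ws (PySem.List.pyRange (k : Int) ((cs.length : Int) + 1)) =
      intOfFind ((List.range' k m).find? (goodAt cs ws.toNat)) := by
  intro m
  induction m with
  | zero =>
      intro k _ hm
      have hnil : PySem.List.pyRange (k : Int) ((cs.length : Int) + 1) = [] :=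
        PySem.List.pyRange_one_eq_nil (by omega)
      rw [hnil]
      rfl
  | succ m ih =>
      intro k hk hm
      have hklen : k ≤ cs.length := by omega
      have hcons := PySem.List.pyRange_one_cons
        (a := (k : Int)) (b := (cs.length : Int) + 1) (by omega)
      rw [hcons, solveLoopB]
      have hsub : (k : Int) - ws = ((k - ws.toNat : Nat) : Int) := by omega
      have hslice : PySem.List.slice cs (some ((k : Int) - ws)) (some (k : Int)) =
          (cs.take k).drop (k - ws.toNat) := by
        rw [hsub, PySem.List.slice_natCast, List.drop_take]
      have hcond : (PySem.Set.len (PySem.Set.ofList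
            (PySem.List.slice cs (some ((k : Int) - ws)) (some (k : Int)))) == ws) =
          goodAt cs ws.toNat k := by
        rw [hslice]
        unfold goodAt winOf
        rw [PySem.Set.len_eq]
        cases hb : decide ((PySem.Set.ofList ((cs.take k).drop (k - ws.toNat))).length = ws.toNat) with
        | false =>
            simp only [decide_eq_false_iff_not] at hb
            simp only [beq_eq_false_iff_ne, ne_eq]
            intro heq; omega
        | true =>
            simp only [decide_eq_true_eq] at hb
            simp only [beq_iff_eq, hb]
            omega
      rw [hcond]
      cases hg : goodAt cs ws.toNat k with
      | false =>
          rw [if_neg (by simp)]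
          rw [List.range'_succ, List.find?_cons, hg]
          have hc1 : ((k : Int) + 1) = ((k + 1 : Nat) : Int) := by omega
          rw [hc1, ih (k + 1) (by omega) (by omega)]
      | true =>
          rw [if_pos rfl]
          rw [List.range'_succ, List.find?_cons, hg]
          rfl

-- positions before the window size are never good
theorem goodAt_false_of_lt (cs : List Char) (w k : Nat) (h : k < w) :
    goodAt cs w k = false := by
  unfold goodAt winOf
  have hk : k - w = 0 := by omega
  rw [hk, List.drop_zero]
  simp only [decide_eq_false_iff_not]
  intro heq
  have h1 := PySem.Set.length_ofList_le (cs.take k)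
  have h2 : (cs.take k).length ≤ k := by
    simp [List.length_take]
  omega

-- the two programs agree for positive window sizes
theorem main_pos (line : String) (ws : Int) (hws : 0 < ws) :
    solve line ws = solve_alt line ws := by
  obtain ⟨w, rfl⟩ : ∃ w : Nat, ws = (w : Int) := ⟨ws.toNat, (Int.toNat_of_nonneg hws.le).symm⟩
  have hw1 : 1 ≤ w := by omega
  have hA : solve line (w : Int) =
      intOfFind ((List.range' 1 line.toList.length).find? (goodAt line.toList w)) := by
    unfold solve
    have := solveLoopA_eq (w : Int) hws line.toList line.toList [] [] PySem.Dict.empty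
      (by simp) (by simp)
      (by simp [PySem.Dict.keys_empty])
      (by intro a; simp [PySem.Dict.getD_empty])
      (by intro a; simp [PySem.Dict.keys_empty])
    simpa using this
  have hB : solve_alt line (w : Int) =
      intOfFind ((List.range' w (line.toList.length + 1 - w)).find?
        (goodAt line.toList w)) := by
    unfold solve_alt
    rw [PySem.Str.len_eq]
    have hmax : max ((w : Nat) : Int) 0 = ((w : Nat) : Int) := by omega
    rw [hmax]
    have := solveLoopB_eq (w : Int) hws line.toList (line.toList.length + 1 - w) w
      (by simp) rfl
    simpa using this
  rw [hA, hB]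
  by_cases hwn : w ≤ line.toList.length
  · have hsplit : List.range' 1 line.toList.length =
        List.range' 1 (w - 1) ++ List.range' w (line.toList.length + 1 - w) := by
      have happ := List.range'_append (s := 1) (m := w - 1)
        (n := line.toList.length + 1 - w) (step := 1)
      have h1 : 1 + 1 * (w - 1) = w := by omega
      have h2 : w - 1 + (line.toList.length + 1 - w) = line.toList.length := by omega
      rw [h1, h2] at happ
      exact happ.symm
    rw [hsplit, List.find?_append]
    have hnone : (List.range' 1 (w - 1)).find? (goodAt line.toList w) = none := by
      rw [List.find?_eq_none]
      intro m hm
      have hlt := (List.mem_range'_1.mp hm).2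
      simp only [Bool.not_eq_true]
      exact goodAt_false_of_lt _ _ _ (by omega)
    rw [hnone, Option.none_or]
  · have h1 : (List.range' 1 line.toList.length).find? (goodAt line.toList w) = none := by
      rw [List.find?_eq_none]
      intro m hm
      have hlt := (List.mem_range'_1.mp hm).2
      simp only [Bool.not_eq_true]
      exact goodAt_false_of_lt _ _ _ (by omega)
    have h2 : line.toList.length + 1 - w = 0 := by omega
    rw [h1, h2]
    rfl

-- a size is never negative, so A returns 0 for negative window sizes
theorem solveLoopA_neg (ws : Int) (hws : ws < 0) :
    ∀ (suf : List Char) (idx : Int) (st : List Char × PySem.Dict Char Int),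
    solveLoopA ws suf idx st = 0 := by
  intro suf
  induction suf with
  | nil => intro idx st; rfl
  | cons c rest ih =>
      intro idx st
      obtain ⟨dq, cnt⟩ := st
      rw [solveLoopA]
      have hne : ∀ (d : PySem.Dict Char Int), ((d.size : Int) == ws) = false := by
        intro d
        simp only [beq_eq_false_iff_ne, ne_eq]
        intro heq; omega
      simp only [hne, Bool.false_eq_true, if_false]
      exact ih _ _

theorem solveLoopB_neg (ws : Int) (hws : ws < 0) (cs : List Char) :
    ∀ (is : List Int), solveLoopB cs ws is = 0 := by
  intro is
  induction is with
  | nil => rfl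
  | cons i rest ih =>
      rw [solveLoopB]
      have hne : (PySem.Set.len (PySem.Set.ofList
          (PySem.List.slice cs (some (i - ws)) (some i))) == ws) = false := by
        simp only [beq_eq_false_iff_ne, ne_eq, PySem.Set.len]
        intro heq; omega
      simp only [hne, Bool.false_eq_true, if_false]
      exact ih

-- inside D_: A returns 1, B returns 0
theorem solveA_zero (line : String) (h : line ≠ "") : solve line 0 = 1 := by
  unfold solve
  have hcs : line.toList ≠ [] := by
    intro hnil
    exact h (String.toList_eq_nil_iff.mp hnil)
  obtain ⟨c, rest, hrw⟩ := List.exists_cons_of_ne_nil hcs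
  rw [hrw, solveLoopA]
  simp [PySem.Dict.modify, PySem.Dict.empty, PySem.Dict.insert, PySem.Dict.getD,
    PySem.Dict.get?, PySem.Dict.erase, PySem.Dict.size, PySem.Dict.contains]

theorem solveB_zero (line : String) : solve_alt line 0 = 0 := by
  unfold solve_alt
  rw [PySem.Str.len_eq]
  have hlt : (0:Int) < (line.toList.length : Int) + 1 := by
    have : (0:Int) ≤ (line.toList.length : Int) := Int.natCast_nonneg _
    omega
  have hmax : max (0 : Int) 0 = (0 : Int) := rfl
  rw [hmax, PySem.List.pyRange_one_cons hlt, solveLoopB]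
  have hsl : PySem.List.slice line.toList (some ((0:Int) - 0)) (some (0:Int)) = [] := by
    have h0 := PySem.List.slice_natCast line.toList 0 0
    simpa using h0
  rw [hsl]
  rfl

-- ===== VERDICT =====
theorem solve_spec : Claim_unchanged_solve := by
  intro line ws _ hD
  rcases lt_trichotomy ws 0 with h | h | h
  · unfold solve solve_alt
    rw [solveLoopA_neg ws h, solveLoopB_neg ws h]
  · subst h
    have hline : line = "" := by
      by_contra hne
      exact hD ⟨rfl, hne⟩
    subst hline
    decide
  · exact main_pos line ws h

theorem solve_changed : Claim_changed_solve := by unfold Claim_changed_solve; decide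

theorem solve_tight : Claim_exact_solve := by
  intro line ws _ hD
  obtain ⟨rfl, hne⟩ := hD
  rw [solveA_zero line hne, solveB_zero line]
  decide
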